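-- pv_equiv track=rewrite | github.com/jsksxs360/prompt-event-coref-emnlp2023 | data/KnowledgeExtraction/omni_argument_extraction.py | insert_marker
-- ===== SOURCE A (Python) =====
-- def insert_marker(text, trigger_pos, whitespace=True):
--     space = " " if whitespace else ""
--     markered_text = ""
--     tokens = text.split()
--     char_pos = 0
--     for i, token in enumerate(tokens):
--         if char_pos == trigger_pos[0]:
--             markered_text += "<event>" + space
--         char_pos += len(token) + len(space)
--         markered_text += token + space
--         if char_pos == trigger_pos[1] + len(space):
--             markered_text += "</event>" + space
--     markered_text = markered_text.strip()
--     return markered_text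
-- ===== SOURCE B (Python) =====
-- def insert_marker(text, trigger_pos, whitespace=True):
--     space = " " if whitespace else ""
--     tokens = text.split()
--     starts = []
--     off = 0
--     for t in tokens:
--         starts.append(off)
--         off += len(t) + len(space)
--     pieces = [t + space for t in tokens]
--     for i in reversed(range(len(tokens))):
--         if starts[i] + len(tokens[i]) == trigger_pos[1]:
--             pieces.insert(i + 1, "</event>" + space)
--         if starts[i] == trigger_pos[0]:
--             pieces.insert(i, "<event>" + space)
--     return "".join(pieces).strip()
-- ===== Notes on version B (the rewrite author's own statement) =====
-- stated objective: alternative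
-- what changed: Replaces A's single accumulator loop (running char_pos, string built by += with inline marker conditions) by a table-then-insert decomposition: build a token-start offset table and a list of token pieces, then insert the two marker pieces back-to-front by list insertion and join once.
import Mathlib
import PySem

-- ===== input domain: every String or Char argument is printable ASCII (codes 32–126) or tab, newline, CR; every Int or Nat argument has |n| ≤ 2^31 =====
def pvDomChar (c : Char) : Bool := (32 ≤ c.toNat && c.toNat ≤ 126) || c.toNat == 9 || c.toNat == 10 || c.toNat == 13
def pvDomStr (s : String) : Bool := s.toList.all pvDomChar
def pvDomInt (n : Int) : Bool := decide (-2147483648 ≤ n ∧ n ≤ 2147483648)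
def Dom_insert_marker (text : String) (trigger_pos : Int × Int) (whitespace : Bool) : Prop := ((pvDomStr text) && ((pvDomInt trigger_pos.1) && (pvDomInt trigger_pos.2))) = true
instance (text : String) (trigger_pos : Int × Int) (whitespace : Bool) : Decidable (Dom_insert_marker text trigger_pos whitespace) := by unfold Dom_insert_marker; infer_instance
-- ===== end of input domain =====

-- B replaces A's single accumulator loop by a table-then-insert decomposition (offset table,
-- piece list, back-to-front marker insertion); objective: alternative, same cost.

-- ===== PORT A =====
-- literal transliteration of A: one pass over enumerate(tokens) carrying (char_pos, markered_text)
def insert_marker (text : String) (trigger_pos : Int × Int) (whitespace : Bool) : String :=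
  let space : List Char := if whitespace then [' '] else []
  let tokens := PySem.Chars.split₀ text.toList
  let st := (PySem.List.enumerate tokens 0).foldl (fun (st : Int × List Char) it =>
    let mt := if st.1 = trigger_pos.1 then st.2 ++ ("<event>".toList ++ space) else st.2
    let cp := st.1 + PySem.Chars.len it.2 + PySem.Chars.len space
    let mt := mt ++ (it.2 ++ space)
    let mt := if cp = trigger_pos.2 + PySem.Chars.len space then mt ++ ("</event>".toList ++ space) else mt
    (cp, mt)) (0, [])
  String.ofList (PySem.Chars.strip st.2)

-- ===== PORT B =====
-- transliteration of Source B: offset table, piece list, reversed-range insertion loop, join+strip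
def insert_marker_alt (text : String) (trigger_pos : Int × Int) (whitespace : Bool) : String :=
  let space : List Char := if whitespace then [' '] else []
  let tokens := PySem.Chars.split₀ text.toList
  let starts := (tokens.foldl (fun (st : List Int × Int) t =>
      (st.1 ++ [st.2], st.2 + PySem.Chars.len t + PySem.Chars.len space)) ([], 0)).1
  let pieces := tokens.map (fun t => t ++ space)
  let pieces := (List.range tokens.length).reverse.foldl (fun ps (i : Nat) =>
      let ps := if PySem.List.pyGetD starts (i : Int) 0 + PySem.Chars.len (PySem.List.pyGetD tokens (i : Int) []) = trigger_pos.2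
                then PySem.List.insert ps ((i : Int) + 1) ("</event>".toList ++ space) else ps
      if PySem.List.pyGetD starts (i : Int) 0 = trigger_pos.1
      then PySem.List.insert ps (i : Int) ("<event>".toList ++ space) else ps) pieces
  String.ofList (PySem.Chars.strip pieces.flatten)   -- "".join(pieces) is concatenation

-- ===== PRECONDITION & SPEC =====
def Spec_insert_marker (text : String) (trigger_pos : Int × Int) (whitespace : Bool) (out : String) : Prop := out = insert_marker_alt text trigger_pos whitespace
instance (text : String) (trigger_pos : Int × Int) (whitespace : Bool) (out : String) : Decidable (Spec_insert_marker text trigger_pos whitespace out) := by unfold Spec_insert_marker; infer_instance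

-- ===== CLAIM (what is proved, stated in full; the proofs are below) =====
def Claim_equal_insert_marker : Prop := ∀ (text : String) (trigger_pos : Int × Int) (whitespace : Bool), Dom_insert_marker text trigger_pos whitespace → Spec_insert_marker text trigger_pos whitespace (insert_marker text trigger_pos whitespace)

-- ===== LEMMAS AND PROOFS =====

-- one token's rendered pieces, at starting offset `off`
def pvChunk (tp : Int × Int) (s : List Char) (off : Int) (t : List Char) : List (List Char) :=
  (if off = tp.1 then ["<event>".toList ++ s] else []) ++ [t ++ s] ++
  (if off + (t.length : Int) = tp.2 then ["</event>".toList ++ s] else [])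

-- total advance of char_pos over a token list
def pvTot (s : List Char) : List (List Char) → Int
  | [] => 0
  | t :: ts => ((t.length : Int) + (s.length : Int)) + pvTot s ts

-- rendered pieces of a token list starting at offset `off`
def pvRender (tp : Int × Int) (s : List Char) (off : Int) : List (List Char) → List (List Char)
  | [] => []
  | t :: ts => pvChunk tp s off t ++ pvRender tp s (off + t.length + s.length) ts

-- the offset table
def pvOffs (s : List Char) (off : Int) : List (List Char) → List Int
  | [] => []
  | t :: ts => off :: pvOffs s (off + t.length + s.length) ts

lemma pvRender_append (tp : Int × Int) (s : List Char) (xs ys : List (List Char)) :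
    ∀ off, pvRender tp s off (xs ++ ys) = pvRender tp s off xs ++ pvRender tp s (off + pvTot s xs) ys := by
  induction xs with
  | nil => intro off; simp [pvRender, pvTot]
  | cons t ts ih => intro off; simp [pvRender, pvTot, ih]; ring_nf

lemma pvOffs_getD (s : List Char) : ∀ (ts : List (List Char)) (off : Int) (k : Nat), k < ts.length →
    (pvOffs s off ts).getD k 0 = off + pvTot s (ts.take k) := by
  intro ts; induction ts with
  | nil => intro off k h; simp at h
  | cons t ts ih =>
    intro off k h
    cases k with
    | zero => simp [pvOffs, pvTot]
    | succ k =>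
      simp only [pvOffs, List.getD_cons_succ, List.take_succ_cons, pvTot]
      rw [ih _ k (by simpa using h)]; ring

-- the starts-building fold of B
lemma pvStarts_fold (s : List Char) : ∀ (ts : List (List Char)) (acc : List Int) (off : Int),
    (ts.foldl (fun (st : List Int × Int) t =>
      (st.1 ++ [st.2], st.2 + PySem.Chars.len t + PySem.Chars.len s)) (acc, off))
    = (acc ++ pvOffs s off ts, off + pvTot s ts) := by
  intro ts; induction ts with
  | nil => intro acc off; simp [pvOffs, pvTot]
  | cons t ts ih =>
    intro acc off
    simp only [List.foldl_cons]
    rw [ih]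
    simp only [pvOffs, pvTot, Prod.mk.injEq, PySem.Chars.len_eq]
    exact ⟨by simp, by ring⟩

-- the A-side loop
lemma pvA_fold (tp : Int × Int) (s : List Char) : ∀ (ts : List (List Char)) (k cp : Int) (mt : List Char),
    ((PySem.List.enumerate ts k).foldl (fun (st : Int × List Char) it =>
      let mt := if st.1 = tp.1 then st.2 ++ ("<event>".toList ++ s) else st.2
      let cp := st.1 + PySem.Chars.len it.2 + PySem.Chars.len s
      let mt := mt ++ (it.2 ++ s)
      let mt := if cp = tp.2 + PySem.Chars.len s then mt ++ ("</event>".toList ++ s) else mt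
      (cp, mt)) (cp, mt))
    = (cp + pvTot s ts, mt ++ (pvRender tp s cp ts).flatten) := by
  intro ts
  induction ts with
  | nil => intro k cp mt; simp [PySem.List.enumerate, pvTot, pvRender]
  | cons t ts ih =>
    intro k cp mt
    have hc : PySem.List.enumerate (t :: ts) k = (k, t) :: PySem.List.enumerate ts (k + 1) := by
      simp [PySem.List.enumerate]
    rw [hc]
    simp only [List.foldl_cons]
    rw [ih]
    refine Prod.ext ?_ ?_
    · simp only [pvTot, PySem.Chars.len_eq]; ring
    · by_cases h1 : cp = tp.1 <;> by_cases hend : cp + (t.length : Int) = tp.2 <;>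
        simp [pvRender, pvChunk, h1, hend, PySem.Chars.len_eq, List.append_assoc] <;>
        (try split_ifs) <;> simp [List.append_assoc]

-- the B-side insertion loop
lemma pvB_loop (tp : Int × Int) (s : List Char) (tokens : List (List Char)) :
    ∀ (k : Nat), k ≤ tokens.length → ∀ (R : List (List Char)),
    (List.range k).foldr (fun (i : Nat) ps =>
      if PySem.List.pyGetD (pvOffs s 0 tokens) (i : Int) 0 = tp.1
      then PySem.List.insert
            (if PySem.List.pyGetD (pvOffs s 0 tokens) (i : Int) 0 + PySem.Chars.len (PySem.List.pyGetD tokens (i : Int) []) = tp.2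
             then PySem.List.insert ps ((i : Int) + 1) ("</event>".toList ++ s) else ps)
            (i : Int) ("<event>".toList ++ s)
      else (if PySem.List.pyGetD (pvOffs s 0 tokens) (i : Int) 0 + PySem.Chars.len (PySem.List.pyGetD tokens (i : Int) []) = tp.2
            then PySem.List.insert ps ((i : Int) + 1) ("</event>".toList ++ s) else ps))
      ((tokens.take k).map (fun t => t ++ s) ++ R)
    = pvRender tp s 0 (tokens.take k) ++ R := by
  intro k
  induction k with
  | zero => intro _ R; simp [pvRender]
  | succ k ih =>
    intro h R
    have hk : k < tokens.length := h
    have htake : tokens.take (k + 1) = tokens.take k ++ [tokens[k]] := by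
      rw [List.take_succ]; simp [List.getElem?_eq_getElem hk]
    have hgetTok : PySem.List.pyGetD tokens (k : Int) [] = tokens[k] := by
      rw [PySem.List.pyGetD_natCast]; exact List.getD_eq_getElem tokens [] hk
    have hgetOff : PySem.List.pyGetD (pvOffs s 0 tokens) (k : Int) 0 = pvTot s (tokens.take k) := by
      rw [PySem.List.pyGetD_natCast]
      rw [pvOffs_getD s tokens 0 k hk]; ring
    have hL : (tokens.take (k + 1)).map (fun t => t ++ s) ++ R
        = ((tokens.take k).map (fun t => t ++ s) ++ [tokens[k] ++ s]) ++ R := by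
      rw [htake, List.map_append]; rfl
    have hlenM : ((tokens.take k).map (fun t => t ++ s)).length = k := by
      simp [List.length_take, Nat.min_eq_left (Nat.le_of_lt hk)]
    have hlenM1 : (((tokens.take k).map (fun t => t ++ s)) ++ [tokens[k] ++ s]).length = k + 1 := by
      rw [List.length_append, hlenM]; rfl
    have hrend : pvRender tp s 0 (tokens.take (k + 1))
        = pvRender tp s 0 (tokens.take k) ++ pvChunk tp s (pvTot s (tokens.take k)) tokens[k] := by
      rw [htake, pvRender_append]; simp [pvRender]
    have hins1 : ∀ v, PySem.List.insert
          (((tokens.take k).map (fun t => t ++ s) ++ [tokens[k] ++ s]) ++ R) ((k : Int) + 1) v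
        = ((tokens.take k).map (fun t => t ++ s) ++ [tokens[k] ++ s]) ++ v :: R := by
      intro v
      have hc : ((k : Int) + 1) = ((k + 1 : Nat) : Int) := by push_cast; ring
      rw [hc, PySem.List.insert_natCast _ _ _ (by simp; omega)]
      rw [List.take_left' hlenM1, List.drop_left' hlenM1]
    have hins2 : ∀ X, PySem.List.insert
          (((tokens.take k).map (fun t => t ++ s) ++ [tokens[k] ++ s]) ++ X) (k : Int) ("<event>".toList ++ s)
        = (tokens.take k).map (fun t => t ++ s) ++ (("<event>".toList ++ s) :: (tokens[k] ++ s) :: X) := by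
      intro X
      rw [PySem.List.insert_natCast _ _ _ (by simp; omega)]
      rw [List.append_assoc, List.take_left' hlenM, List.drop_left' hlenM]
      simp
    rw [List.range_succ, List.foldr_append]
    simp only [List.foldr_cons, List.foldr_nil]
    rw [hgetTok, hgetOff, hL]
    by_cases hE : pvTot s (tokens.take k) + PySem.Chars.len (tokens[k]) = tp.2 <;>
      by_cases hS : pvTot s (tokens.take k) = tp.1
    · rw [if_pos hE, if_pos hS, hins1, hins2, ih (Nat.le_of_lt hk), hrend]
      simp only [PySem.Chars.len_eq] at hE
      rw [hS] at hE
      simp [pvChunk, hS, hE, List.append_assoc]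
    · rw [if_pos hE, if_neg hS, hins1]
      have h24 : ((tokens.take k).map (fun t => t ++ s) ++ [tokens[k] ++ s]) ++ ("</event>".toList ++ s) :: R
          = (tokens.take k).map (fun t => t ++ s) ++ ((tokens[k] ++ s) :: ("</event>".toList ++ s) :: R) := by simp
      rw [h24, ih (Nat.le_of_lt hk), hrend]
      simp only [PySem.Chars.len_eq] at hE
      simp [pvChunk, hS, hE, List.append_assoc]
    · rw [if_neg hE, if_pos hS, hins2, ih (Nat.le_of_lt hk), hrend]
      simp only [PySem.Chars.len_eq] at hE
      rw [hS] at hE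
      simp [pvChunk, hS, hE, List.append_assoc]
    · rw [if_neg hE, if_neg hS]
      have : ((tokens.take k).map (fun t => t ++ s) ++ [tokens[k] ++ s]) ++ R
          = (tokens.take k).map (fun t => t ++ s) ++ ((tokens[k] ++ s) :: R) := by simp
      rw [this, ih (Nat.le_of_lt hk), hrend]
      simp only [PySem.Chars.len_eq] at hE
      simp [pvChunk, hS, hE, List.append_assoc]

-- ===== VERDICT (by name: the statement is the Claim_ definition above) =====
theorem insert_marker_spec : Claim_equal_insert_marker := by
  intro text tp ws _
  unfold Spec_insert_marker insert_marker insert_marker_alt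
  dsimp only
  rw [pvA_fold tp (if ws then [' '] else []) (PySem.Chars.split₀ text.toList) 0 0 []]
  rw [pvStarts_fold]
  rw [List.foldl_reverse]
  have hB := pvB_loop tp (if ws then [' '] else []) (PySem.Chars.split₀ text.toList)
      (PySem.Chars.split₀ text.toList).length le_rfl []
  simp only [List.take_length, List.append_nil] at hB
  dsimp only
  simp only [List.nil_append]
  exact congrArg (fun l : List (List Char) => String.ofList (PySem.Chars.strip l.flatten)) hB.symm
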